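-- pv_equiv track=rewrite | github.com/budelius/clearcut_detection | pytorch/utils.py | count_channels
-- ===== SOURCE A (Python) =====
-- def count_channels(channels):
--     count = 0
--     for ch in channels:
--         if ch == 'rgb':
--             count += 3
--         elif ch in ['ndvi', 'b8']:
--             count += 1
--         else:
--             raise Exception('{} channel is unknown!'.format(ch))
--
--     return count
-- ===== SOURCE B (Python) =====
-- def count_channels(channels):
--     for ch in channels:
--         if ch not in ('rgb', 'ndvi', 'b8'):
--             raise Exception('{} channel is unknown!'.format(ch))
--     return 3 * channels.count('rgb') + channels.count('ndvi') + channels.count('b8')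
-- ===== Notes on version B (the rewrite author's own statement) =====
-- stated objective: alternative
-- what changed: Replaces A's single fused accumulate loop with a validation pass followed by separate counting scans (3*count('rgb') + count('ndvi') + count('b8')).
import Mathlib
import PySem

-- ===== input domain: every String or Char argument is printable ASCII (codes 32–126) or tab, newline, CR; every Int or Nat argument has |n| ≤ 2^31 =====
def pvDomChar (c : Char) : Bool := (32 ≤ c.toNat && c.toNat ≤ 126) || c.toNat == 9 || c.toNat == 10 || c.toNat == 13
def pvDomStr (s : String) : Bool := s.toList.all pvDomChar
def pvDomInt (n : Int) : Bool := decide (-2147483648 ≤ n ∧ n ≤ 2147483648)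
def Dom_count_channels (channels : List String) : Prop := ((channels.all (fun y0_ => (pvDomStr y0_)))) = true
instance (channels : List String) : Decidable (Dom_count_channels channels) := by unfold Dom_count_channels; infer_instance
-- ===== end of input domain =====

-- B replaces A's fused accumulate-or-raise loop with a validation pass plus
-- three separate counting scans (alternative decomposition, same cost).


-- ===== PORT A =====
-- A: one loop, accumulating 3 for 'rgb', 1 for 'ndvi'/'b8'; raises on anything else.
-- The raising branch is unreachable under Pre_; the port returns 0 there.
def count_channels (channels : List String) : Int :=
  match channels with
  | [] => 0
  | ch :: rest =>
    if ch = "rgb" then 3 + count_channels rest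
    else if ch = "ndvi" ∨ ch = "b8" then 1 + count_channels rest
    else 0  -- Python raises here; excluded by Pre_count_channels

-- ===== PORT B =====
-- B: validation pass is a raise (excluded by Pre_), then three counting scans.
def count_channels_alt (channels : List String) : Int :=
  3 * (channels.count "rgb" : Int) + (channels.count "ndvi" : Int) + (channels.count "b8" : Int)

-- ===== PRECONDITION & SPEC =====
-- Pre_ excludes exactly the inputs where A (and B) raise Exception: a channel not in {rgb, ndvi, b8}.
def Pre_count_channels (channels : List String) : Prop :=
  (channels.all (fun ch => ch == "rgb" || ch == "ndvi" || ch == "b8")) = true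
instance (channels : List String) : Decidable (Pre_count_channels channels) := by unfold Pre_count_channels; infer_instance
def pvWitness_count_channels : List String := ["rgb", "ndvi", "b8", "rgb"]

def Spec_count_channels (channels : List String) (out : Int) : Prop := out = count_channels_alt channels
instance (channels : List String) (out : Int) : Decidable (Spec_count_channels channels out) := by unfold Spec_count_channels; infer_instance

-- ===== CLAIM (what is proved, stated in full; the proofs are below) =====
def Claim_equal_count_channels : Prop := ∀ (channels : List String), Dom_count_channels channels → Pre_count_channels channels → Spec_count_channels channels (count_channels channels)

-- ===== LEMMAS AND PROOFS =====
theorem count_channels_eq_alt (channels : List String)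
    (h : Pre_count_channels channels) :
    count_channels channels = count_channels_alt channels := by
  induction channels with
  | nil => simp [count_channels, count_channels_alt]
  | cons ch rest ih =>
    unfold Pre_count_channels at h
    simp only [List.all_cons, Bool.and_eq_true, Bool.or_eq_true, beq_iff_eq] at h
    have hrest := ih h.2
    unfold count_channels count_channels_alt
    unfold count_channels_alt at hrest
    rcases h.1 with (h1 | h1) | h1 <;> subst h1 <;>
      (simp [List.count_cons]; omega)

-- ===== VERDICT (by name: the statement is the Claim_ definition above) =====
theorem count_channels_spec : Claim_equal_count_channels := by
  intro channels _ hpre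
  exact count_channels_eq_alt channels hpre
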